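-- pv_equiv track=rewrite | github.com/ishandutta2007/codeforces | whatshisbucket/normal/1043/C.py | f
-- ===== SOURCE A (Python) =====
-- def f(mag):
--     if len(mag)==1:
--         return([])
--     elif mag[-1]=="b":
--         return(f(mag[:-1]))
--     else:
--         boi=len(mag)
--         old=f(mag[:-1])
--         if boi-1 in old:
--             old.pop()
--             old.append(boi)
--             return(old)
--         else:
--             old.append(boi-1)
--             old.append(boi)
--             return(old)
-- ===== SOURCE B (Python) =====
-- def f(mag):
--     out = []
--     for boi, c in enumerate(mag[1:], 2):
--         if c != "b":
--             if out and out[-1] == boi - 1: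
--                 out[-1] = boi
--             else:
--                 out += [boi - 1, boi]
--     return out
-- ===== Notes on version B (the rewrite author's own statement) =====
-- stated objective: faster
-- what changed: Replaced A's recursion on mag[:-1] with its O(n) 'boi-1 in old' membership scan and list slicing by a single iterative left-to-right pass that only inspects the last element of the output list.
import Mathlib
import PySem

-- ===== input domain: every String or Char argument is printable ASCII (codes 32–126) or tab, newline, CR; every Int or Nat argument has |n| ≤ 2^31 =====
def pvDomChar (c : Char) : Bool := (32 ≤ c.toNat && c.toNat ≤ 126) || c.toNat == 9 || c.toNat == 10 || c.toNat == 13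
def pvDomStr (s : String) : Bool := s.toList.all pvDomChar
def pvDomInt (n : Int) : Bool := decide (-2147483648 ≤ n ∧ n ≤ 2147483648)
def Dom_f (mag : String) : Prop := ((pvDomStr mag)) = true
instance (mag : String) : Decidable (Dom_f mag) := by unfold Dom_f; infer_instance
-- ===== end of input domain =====

-- B replaces A's O(n^2) recursion (prefix slicing + 'boi-1 in old' scan) by a single
-- left-to-right pass checking only the last element; objective: faster (asymptotic).

-- ===== PORT A =====
-- A recurses on mag[:-1]; we represent the string as its reversed char list so that
-- dropping the last character is peeling the head (same algorithm, same steps).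
def fA : List Char → List Int
  | [] => []                                   -- unreachable inside Pre_ (Python raises on "")
  | [_] => []                                  -- len(mag)==1
  | c :: rest =>                               -- c = mag[-1], rest = reversed mag[:-1]
      if c = 'b' then fA rest
      else
        let boi : Int := (rest.length : Int) + 1   -- boi = len(mag)
        let old := fA rest
        if boi - 1 ∈ old then old.dropLast ++ [boi]   -- old.pop(); old.append(boi)
        else old ++ [boi - 1, boi]

def f (mag : String) : List Int := fA mag.toList.reverse

-- ===== PORT B =====
-- step of Source B's loop body, p = (boi, c)
def stepB (out : List Int) (p : Int × Char) : List Int :=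
  if p.2 ≠ 'b' then
    if out ≠ [] ∧ PySem.List.pyGet? out (-1) = some (p.1 - 1)   -- out and out[-1] == boi-1
    then out.dropLast ++ [p.1]                                   -- out[-1] = boi
    else out ++ [p.1 - 1, p.1]
  else out

def f_alt (mag : String) : List Int :=
  (PySem.List.enumerate (mag.toList.drop 1) 2).foldl stepB []    -- for boi, c in enumerate(mag[1:], 2)

-- ===== PRECONDITION & SPEC =====
-- Python A raises IndexError (mag[-1]) on the empty string; Pre_ excludes exactly "".
def Pre_f (mag : String) : Prop := mag ≠ ""
instance (mag : String) : Decidable (Pre_f mag) := by unfold Pre_f; infer_instance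
def pvWitness_f : String := "aab"

def Spec_f (mag : String) (out : List Int) : Prop := out = f_alt mag
instance (mag : String) (out : List Int) : Decidable (Spec_f mag out) := by unfold Spec_f; infer_instance

-- ===== CLAIM (what is proved, stated in full; the proofs are below) =====
def Claim_equal_f : Prop := ∀ (mag : String), Dom_f mag → Pre_f mag → Spec_f mag (f mag)

-- ===== LEMMAS AND PROOFS =====

-- invariant of A's result: strictly increasing, all elements ≤ length of the input
theorem fA_inv (rl : List Char) :
    List.Pairwise (· < ·) (fA rl) ∧ ∀ x ∈ fA rl, x ≤ (rl.length : Int) := by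
  induction rl with
  | nil => simp [fA]
  | cons c rest ih =>
    rcases rest with _ | ⟨x, xs⟩
    · simp [fA]
    rcases ih with ⟨hp, hb⟩
    have hlen2 : ((c :: x :: xs).length : Int) = ((x :: xs).length : Int) + 1 := by
      push_cast [List.length_cons]; ring
    by_cases hc : c = 'b'
    · constructor
      · simpa [fA, hc] using hp
      · intro y hy
        simp only [fA, hc] at hy
        have := hb y hy; omega
    · simp only [fA, if_neg hc]
      set boi : Int := ((x :: xs).length : Int) + 1 with hboi
      set old := fA (x :: xs) with hold
      have hb' : ∀ y ∈ old, y ≤ boi - 1 := by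
        intro y hy; have := hb y hy; omega
      by_cases hm : boi - 1 ∈ old
      · simp only [if_pos hm]
        constructor
        · refine List.pairwise_append.2 ⟨hp.sublist (List.dropLast_sublist _), by simp, ?_⟩
          intro y hy z hz
          simp at hz; subst hz
          have := hb' y (List.dropLast_subset _ hy); omega
        · intro y hy
          rcases List.mem_append.1 hy with h | h
          · have := hb' y (List.dropLast_subset _ h); omega
          · simp at h; subst h; omega
      · simp only [if_neg hm]
        constructor
        · refine List.pairwise_append.2 ⟨hp, by simp, ?_⟩
          intro y hy z hz
          have h1 := hb' y hy
          have h2 : y ≠ boi - 1 := fun h => hm (h ▸ hy)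
          simp at hz
          rcases hz with h | h <;> omega
        · intro y hy
          rcases List.mem_append.1 hy with h | h
          · have := hb' y h; omega
          · simp at h; omega

-- in a strictly increasing list every element is ≤ the last one
theorem le_getLast_of_pairwise : ∀ (l : List Int) (m : Int),
    List.Pairwise (· < ·) l → l.getLast? = some m → ∀ x ∈ l, x ≤ m := by
  intro l
  induction l using List.reverseRecOn with
  | nil => intro m _ hm; simp at hm
  | append_singleton l' a _ =>
    intro m hp hm x hx
    have ha : a = m := by simpa using hm
    subst ha
    rcases List.mem_append.1 hx with h | h
    · have := (List.pairwise_append.1 hp).2.2 x h a (by simp)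
      omega
    · simp at h; omega

-- with the invariant, membership of k is exactly "k is the last element"
theorem mem_iff_getLast (old : List Int) (k : Int)
    (hp : List.Pairwise (· < ·) old) (hb : ∀ x ∈ old, x ≤ k) :
    k ∈ old ↔ old.getLast? = some k := by
  constructor
  · intro hk
    have hne : old ≠ [] := List.ne_nil_of_mem hk
    obtain ⟨m, hlast⟩ := Option.isSome_iff_exists.1 (List.getLast?_isSome.2 hne)
    have hmmem : m ∈ old := List.mem_of_getLast? hlast
    have h1 : k ≤ m := le_getLast_of_pairwise old m hp hlast k hk
    have h2 : m ≤ k := hb m hmmem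
    rw [hlast, Option.some.injEq]; omega
  · intro h; exact List.mem_of_getLast? h

-- main induction: A on the reversed list = B's left fold
theorem fA_eq_fold (l : List Char) :
    fA l.reverse = (PySem.List.enumerate (l.drop 1) 2).foldl stepB [] := by
  induction l using List.reverseRecOn with
  | nil => simp [fA, PySem.List.enumerate_nil]
  | append_singleton l c ih =>
    rcases l with _ | ⟨x, l'⟩
    · simp [fA, PySem.List.enumerate_nil]
    · have hdrop : ((x :: l') ++ [c]).drop 1 = (x :: l').drop 1 ++ [c] := by simp
      rw [hdrop, PySem.List.enumerate_append, List.foldl_append, ← ih]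
      simp only [PySem.List.enumerate_cons, PySem.List.enumerate_nil, List.foldl_cons, List.foldl_nil]
      have hboi : (2 : Int) + ((x :: l').drop 1).length = ((x :: l').length : Int) + 1 := by
        have h1 : ((x :: l').drop 1).length = l'.length := by simp
        rw [h1]; push_cast [List.length_cons]; ring
      rw [hboi]
      -- unfold one step of fA on c :: (x :: l').reverse
      obtain ⟨y, ys, hyr⟩ : ∃ y ys, (x :: l').reverse = y :: ys := by
        rcases h : (x :: l').reverse with _ | ⟨y, ys⟩
        · exact absurd h (by simp)
        · exact ⟨y, ys, rfl⟩
      have hlen : ((y :: ys).length : Int) = ((x :: l').length : Int) := by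
        rw [← hyr]; simp
      rw [show ((x :: l') ++ [c]).reverse = c :: (x :: l').reverse by simp, hyr]
      set old := fA (y :: ys) with hold
      have hinv := fA_inv (y :: ys)
      rw [← hyr] at hinv
      rw [hyr] at hinv
      rcases hinv with ⟨hp, hb⟩
      by_cases hc : c = 'b'
      · simp [fA, stepB, hc, hold]
      · simp only [fA, if_neg hc, stepB, if_pos (by simpa using hc)]
        have hklen : ((y :: ys).length : Int) + 1 - 1 = ((x :: l').length : Int) := by omega
        have hmem : (((y :: ys).length : Int) + 1 - 1 ∈ old) ↔
            (old.getLast? = some (((x :: l').length : Int) + 1 - 1)) := by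
          rw [hklen]
          have : ((x :: l').length : Int) + 1 - 1 = ((x :: l').length : Int) := by omega
          rw [this]
          exact mem_iff_getLast old _ hp (by rw [← hlen]; exact hb)
        have hget : PySem.List.pyGet? old (-1) = old.getLast? := PySem.List.pyGet?_neg_one old
        by_cases hm : ((y :: ys).length : Int) + 1 - 1 ∈ old
        · have hlast := hmem.1 hm
          have hne : old ≠ [] := by intro h; rw [h] at hlast; simp at hlast
          rw [if_pos hm, if_pos ⟨hne, by rw [hget]; exact hlast⟩]
          simp only [hold]
          rw [hlen]
        · have hlast : ¬ (old ≠ [] ∧ PySem.List.pyGet? old (-1) = some (((x :: l').length : Int) + 1 - 1)) := by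
            rintro ⟨-, h⟩
            exact hm (hmem.2 (by rw [← hget]; exact h))
          rw [if_neg hm, if_neg hlast]
          simp only [hold]
          rw [hlen]

-- ===== VERDICT (by name: the statement is the Claim_ definition above) =====
theorem f_spec : Claim_equal_f := by
  intro mag _ _
  show f mag = f_alt mag
  unfold f f_alt
  exact fA_eq_fold mag.toList
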